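-- pv_equiv track=rewrite | github.com/jrome5/AdventOfCode2023 | 1/part2.py | check_for_numbers
-- ===== SOURCE A (Python) =====
-- import collections
--
-- def check_for_numbers(line):
--     values = {}
--     numbers = ['zero','one', 'two', 'three', 'four', 'five', 'six', 'seven', 'eight', 'nine']
--     #check for word numbers
--     for i,n in enumerate(numbers):
--         try:
--             occurances = [k for k in range(len(line)) if line.startswith(n, k)]
--             for o in occurances:
--                 values[o] = i
--         except ValueError:
--             continue
--     #check for char numbers
--     for i,c in enumerate(line):
--         if(is_number(c)):
--             values[i] = int(c)
--     #sort list
--     try: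
--         # sorted_dict = {k: v for k, v in sorted(values.items(), key=lambda item: item[1])}
--         od = collections.OrderedDict(sorted(values.items()))
--         return list(od.values())
--     except ValueError:
--         return [0,0]
--
-- def is_number(n):
--     try:
--         float(n)   # Type-casting the string to `float`.
--                    # If string is not a valid `float`,
--                    # it'll raise `ValueError` exception
--     except ValueError:
--         return False
--     return True
-- ===== SOURCE B (Python) =====
-- def check_for_numbers(line):
--     words = ['zero', 'one', 'two', 'three', 'four', 'five', 'six', 'seven', 'eight', 'nine']
--     out = []
--     for i in range(len(line)):
--         c = line[i]
--         if '0' <= c <= '9':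
--             out.append(int(c))
--         else:
--             for v, w in enumerate(words):
--                 if line.startswith(w, i):
--                     out.append(v)
--                     break
--     return out
-- ===== Notes on version B (the rewrite author's own statement) =====
-- stated objective: alternative
-- what changed: A records word/digit values keyed by position in a dict and sorts the items; B does one left-to-right scan over positions, appending each digit or matching word value in order, with no dict and no sort.
import Mathlib
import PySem

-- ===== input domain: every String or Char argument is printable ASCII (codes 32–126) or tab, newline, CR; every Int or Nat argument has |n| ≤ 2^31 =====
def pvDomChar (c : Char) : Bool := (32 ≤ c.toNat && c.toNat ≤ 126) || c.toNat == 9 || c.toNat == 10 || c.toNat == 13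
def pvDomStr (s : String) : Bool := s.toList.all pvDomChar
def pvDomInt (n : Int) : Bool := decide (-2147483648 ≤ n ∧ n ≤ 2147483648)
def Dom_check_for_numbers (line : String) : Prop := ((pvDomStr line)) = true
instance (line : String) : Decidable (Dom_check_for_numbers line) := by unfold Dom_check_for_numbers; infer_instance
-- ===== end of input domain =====

-- B replaces A's dict-of-positions-then-sort by a single left-to-right scan that appends each
-- position's value in order (objective: alternative — one pass, no dict and no sort).
-- Port note: is_number(c)/int(c) are ported as a digit test / c-'0', exact on the printable-ASCII domain.


-- ===== PORT A =====
-- the word list, shared verbatim by both Pythons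
def cfnWords : List (List Char) :=
  [['z','e','r','o'], ['o','n','e'], ['t','w','o'], ['t','h','r','e','e'], ['f','o','u','r'],
   ['f','i','v','e'], ['s','i','x'], ['s','e','v','e','n'], ['e','i','g','h','t'], ['n','i','n','e']]

-- is_number(c): float(c) on a single printable-ASCII character succeeds exactly when c is a digit
def cfnIsNumber (c : Char) : Bool := decide ('0' ≤ c) && decide (c ≤ '9')

-- int(c) for a digit character c (the call is guarded by is_number)
def cfnDigitVal (c : Char) : Int := (c.toNat : Int) - 48

def check_for_numbers (line : String) : List Int :=
  let cs := line.toList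
  let values : PySem.Dict Int Int := PySem.Dict.empty
  -- for i,n in enumerate(numbers): occurances = [k for k in range(len(line)) if line.startswith(n, k)];
  --   for o in occurances: values[o] = i   (the try/except ValueError around it is dead code)
  let values := (PySem.List.enumerate cfnWords).foldl (fun d p =>
      ((List.range cs.length).filter (fun k => PySem.Chars.startswith (cs.drop k) p.2)).foldl
        (fun d (o : Nat) => d.insert (o : Int) p.1) d) values
  -- for i,c in enumerate(line): if is_number(c): values[i] = int(c)
  let values := (PySem.List.enumerate cs).foldl (fun d p =>
      if cfnIsNumber p.2 then d.insert p.1 (cfnDigitVal p.2) else d) values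
  -- list(collections.OrderedDict(sorted(values.items())).values())
  (PySem.List.sorted2 values.items (·.1) (·.2)).map (·.2)

-- ===== PORT B =====
-- one pass over the suffixes of the line: digit → its value, else first word that is a prefix here
def cfnScan : List Char → List Int
  | [] => []
  | c :: rest =>
      if cfnIsNumber c then cfnDigitVal c :: cfnScan rest
      else
        match (PySem.List.enumerate cfnWords).find? (fun p => PySem.Chars.startswith (c :: rest) p.2) with
        | some p => p.1 :: cfnScan rest
        | none => cfnScan rest

def check_for_numbers_alt (line : String) : List Int := cfnScan line.toList

-- ===== PRECONDITION & SPEC =====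
def Spec_check_for_numbers (line : String) (out : List Int) : Prop := out = check_for_numbers_alt line
instance (line : String) (out : List Int) : Decidable (Spec_check_for_numbers line out) := by unfold Spec_check_for_numbers; infer_instance

-- ===== CLAIM (what is proved, stated in full; the proofs are below) =====
def Claim_equal_check_for_numbers : Prop := ∀ (line : String), Dom_check_for_numbers line → Spec_check_for_numbers line (check_for_numbers line)

-- ===== LEMMAS AND PROOFS =====

-- the value contributed at the position whose suffix is t (digit first, else first matching word)
def cfnValAt : List Char → Option Int
  | [] => none
  | c :: rest =>
      if cfnIsNumber c then some (cfnDigitVal c)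
      else ((PySem.List.enumerate cfnWords).find? (fun p => PySem.Chars.startswith (c :: rest) p.2)).map (·.1)

theorem cfnScan_eq_filterMap (cs : List Char) :
    cfnScan cs = (List.range cs.length).filterMap (fun k => cfnValAt (cs.drop k)) := by
  induction cs with
  | nil => simp [cfnScan]
  | cons c rest ih =>
    rw [List.length_cons, List.range_succ_eq_map, List.filterMap_cons, List.filterMap_map]
    have hdrop : (fun k => cfnValAt ((c :: rest).drop (k + 1))) = fun k => cfnValAt (rest.drop k) := by
      funext k; rfl
    show cfnScan (c :: rest) = _
    simp only [List.drop_zero, Function.comp_def, hdrop, ← ih]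
    cases h : cfnIsNumber c with
    | true => simp [cfnScan, cfnValAt, h]
    | false =>
      cases hf : (PySem.List.enumerate cfnWords).find? (fun p => PySem.Chars.startswith (c :: rest) p.2) with
      | none => simp [cfnScan, cfnValAt, h, hf]
      | some p => simp [cfnScan, cfnValAt, h, hf]

def cfnMatchB (cs : List Char) (j : Int) (w : List Char) : Bool :=
  decide (j ∈ ((List.range cs.length).filter (fun k => PySem.Chars.startswith (cs.drop k) w)).map (Nat.cast : Nat → Int))

theorem get?_occFold (v : Int) (occ : List Nat) : ∀ (d : PySem.Dict Int Int) (j : Int),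
    (occ.foldl (fun d o => d.insert (o : Int) v) d).get? j =
      if j ∈ occ.map (Nat.cast : Nat → Int) then some v else d.get? j := by
  induction occ with
  | nil => simp
  | cons o occ ih =>
    intro d j
    simp only [List.foldl_cons, ih, List.map_cons, List.mem_cons]
    by_cases hj : j ∈ occ.map (Nat.cast : Nat → Int)
    · simp [hj]
    · by_cases he : j = (o : Int) <;> simp [hj, he, PySem.Dict.get?_insert]

theorem get?_wordFold (cs : List Char) : ∀ (l : List (Int × List Char)) (d : PySem.Dict Int Int) (j : Int),
    (∀ p ∈ l, ∀ q ∈ l, cfnMatchB cs j p.2 = true → cfnMatchB cs j q.2 = true → p = q) →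
    (l.foldl (fun d p =>
        ((List.range cs.length).filter (fun k => PySem.Chars.startswith (cs.drop k) p.2)).foldl
          (fun d o => d.insert (o : Int) p.1) d) d).get? j =
      match l.find? (fun p => cfnMatchB cs j p.2) with
      | some p => some p.1
      | none => d.get? j := by
  intro l
  induction l with
  | nil => intro d j _; simp
  | cons p l ih =>
    intro d j hU
    have hstep : ∀ d' : PySem.Dict Int Int,
        (((List.range cs.length).filter (fun k => PySem.Chars.startswith (cs.drop k) p.2)).foldl
          (fun d o => d.insert (o : Int) p.1) d').get? j =
          if cfnMatchB cs j p.2 then some p.1 else d'.get? j := by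
      intro d'
      rw [get?_occFold]
      by_cases h : j ∈ ((List.range cs.length).filter (fun k => PySem.Chars.startswith (cs.drop k) p.2)).map (Nat.cast : Nat → Int) <;>
        simp [cfnMatchB, h]
    rw [List.foldl_cons, ih _ _ (fun a ha b hb => hU a (List.mem_cons_of_mem _ ha) b (List.mem_cons_of_mem _ hb)),
        List.find?_cons]
    by_cases hp : cfnMatchB cs j p.2 = true
    · simp only [hp]
      cases hf : l.find? (fun q => cfnMatchB cs j q.2) with
      | none => simp [hstep, hp]
      | some q =>
        have hq := List.find?_some hf
        have hmem := List.mem_cons_of_mem p (List.mem_of_find?_eq_some hf)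
        have := hU q hmem p (List.mem_cons_self) hq hp
        simp [this]
    · simp only [Bool.not_eq_true] at hp
      simp only [hp]
      cases hf : l.find? (fun q => cfnMatchB cs j q.2) with
      | none => simp [hstep, hp]
      | some q => simp

theorem get?_digitFold : ∀ (l : List (Int × Char)) (d : PySem.Dict Int Int) (j : Int),
    l.Pairwise (fun a b => a.1 ≠ b.1) →
    (l.foldl (fun d p => if cfnIsNumber p.2 then d.insert p.1 (cfnDigitVal p.2) else d) d).get? j =
      match l.find? (fun p => p.1 == j && cfnIsNumber p.2) with
      | some p => some (cfnDigitVal p.2)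
      | none => d.get? j := by
  intro l
  induction l with
  | nil => intro d j _; simp
  | cons p l ih =>
    intro d j hP
    rw [List.foldl_cons, ih _ _ (List.Pairwise.of_cons hP), List.find?_cons]
    by_cases hd : p.1 = j
    · have hnone : l.find? (fun q => q.1 == j && cfnIsNumber q.2) = none := by
        rw [List.find?_eq_none]
        intro q hq
        have : p.1 ≠ q.1 := (List.pairwise_cons.mp hP).1 q hq
        simp [← hd, Ne.symm this]
      rw [hnone]
      by_cases hn : cfnIsNumber p.2 = true
      · simp [hd, hn]
      · simp only [Bool.not_eq_true] at hn
        simp [hd, hn]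
    · have hpred : (p.1 == j && cfnIsNumber p.2) = false := by simp [hd]
      rw [hpred]
      cases hf : l.find? (fun q => q.1 == j && cfnIsNumber q.2) with
      | some q => simp
      | none =>
        by_cases hn : cfnIsNumber p.2 = true
        · simp [hn, PySem.Dict.get?_insert, Ne.symm hd]
        · simp only [Bool.not_eq_true] at hn
          simp [hn]

theorem find?_enum_digit (cs : List Char) : ∀ (s j : Int),
    (PySem.List.enumerate cs s).find? (fun p => p.1 == j && cfnIsNumber p.2) =
      if 0 ≤ j - s then
        (cs[(j - s).toNat]?).bind (fun c => if cfnIsNumber c then some (j, c) else none)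
      else none := by
  induction cs with
  | nil => intro s j; simp
  | cons c cs ih =>
    intro s j
    rw [PySem.List.enumerate_cons, List.find?_cons]
    by_cases hj : s = j
    · have h0 : j - s = 0 := by omega
      by_cases hn : cfnIsNumber c = true
      · simp [hj, hn]
      · simp only [Bool.not_eq_true] at hn
        simp only [hj, hn, beq_self_eq_true, Bool.true_and]
        rw [ih]
        simp [hn]
    · have hpred : ((s, c).1 == j && cfnIsNumber (s, c).2) = false := by simp [hj]
      rw [hpred, ih]
      by_cases hge : 0 ≤ j - s
      · have h2 : (j - s).toNat = (j - (s + 1)).toNat + 1 := by omega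
        simp [show s < j from by omega, show s ≤ j from by omega, h2]
      · simp [show ¬ s < j from by omega, show ¬ s ≤ j from by omega]

theorem matchB_natCast (cs : List Char) (k : Nat) (hk : k < cs.length) (w : List Char) :
    cfnMatchB cs (k : Int) w = PySem.Chars.startswith (cs.drop k) w := by
  by_cases h : PySem.Chars.startswith (cs.drop k) w = true
  · simp only [cfnMatchB, h]
    exact decide_eq_true (by
      simp only [List.mem_map, List.mem_filter, List.mem_range]
      exact ⟨k, ⟨hk, h⟩, rfl⟩)
  · simp only [Bool.not_eq_true] at h
    simp only [cfnMatchB, h]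
    simp only [decide_eq_false_iff_not, List.mem_map, List.mem_filter, List.mem_range]
    rintro ⟨a, ⟨_, ha⟩, hak⟩
    rw [Int.natCast_inj] at hak
    rw [hak] at ha
    rw [ha] at h
    exact absurd h (by simp)

theorem matchB_out (cs : List Char) (j : Int) (w : List Char)
    (h : ∀ k : Nat, k < cs.length → j ≠ (k : Int)) : cfnMatchB cs j w = false := by
  simp only [cfnMatchB, decide_eq_false_iff_not, List.mem_map, List.mem_filter, List.mem_range]
  rintro ⟨k, ⟨hk, _⟩, hj⟩
  exact h k hk hj.symm

theorem cfnWords_prefix_eq : ∀ w1 ∈ cfnWords, ∀ w2 ∈ cfnWords, w1 <+: w2 → w1 = w2 := by decide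

theorem cfnWords_nodup : cfnWords.Nodup := by decide

theorem cfnMatchB_elim (cs : List Char) (j : Int) (w : List Char) (h : cfnMatchB cs j w = true) :
    ∃ k : Nat, k < cs.length ∧ j = (k : Int) ∧ w <+: cs.drop k := by
  simp only [cfnMatchB, decide_eq_true_eq, List.mem_map, List.mem_filter, List.mem_range] at h
  obtain ⟨k, ⟨hk, hs⟩, hj⟩ := h
  exact ⟨k, hk, hj.symm, (PySem.Chars.startswith_iff _ _).mp hs⟩

theorem cfnUnique (cs : List Char) (j : Int) :
    ∀ p ∈ PySem.List.enumerate cfnWords, ∀ q ∈ PySem.List.enumerate cfnWords,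
      cfnMatchB cs j p.2 = true → cfnMatchB cs j q.2 = true → p = q := by
  intro p hp q hq hBp hBq
  obtain ⟨k1, hk1, hj1, hpre1⟩ := cfnMatchB_elim cs j p.2 hBp
  obtain ⟨k2, hk2, hj2, hpre2⟩ := cfnMatchB_elim cs j q.2 hBq
  have hkk : k1 = k2 := by
    have := hj1.symm.trans hj2
    exact_mod_cast this
  subst hkk
  have hsnd : p.2 = q.2 := by
    obtain ⟨i1, hi1, hp'⟩ := (PySem.List.mem_enumerate_iff _ _ _).mp hp
    obtain ⟨i2, hi2, hq'⟩ := (PySem.List.mem_enumerate_iff _ _ _).mp hq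
    rcases List.prefix_or_prefix_of_prefix hpre1 hpre2 with h | h
    · exact cfnWords_prefix_eq _ (by rw [hp']; exact List.getElem_mem _) _ (by rw [hq']; exact List.getElem_mem _) h
    · exact (cfnWords_prefix_eq _ (by rw [hq']; exact List.getElem_mem _) _ (by rw [hp']; exact List.getElem_mem _) h).symm
  obtain ⟨i1, hi1, hp'⟩ := (PySem.List.mem_enumerate_iff _ _ _).mp hp
  obtain ⟨i2, hi2, hq'⟩ := (PySem.List.mem_enumerate_iff _ _ _).mp hq
  have : cfnWords[i1] = cfnWords[i2] := by
    have e1 : p.2 = cfnWords[i1] := by rw [hp']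
    have e2 : q.2 = cfnWords[i2] := by rw [hq']
    rw [← e1, ← e2, hsnd]
  have hii : i1 = i2 := (List.Nodup.getElem_inj_iff cfnWords_nodup).mp this
  subst hii
  rw [hp', hq']

def cfnDict (cs : List Char) : PySem.Dict Int Int :=
  (PySem.List.enumerate cs).foldl (fun d p =>
      if cfnIsNumber p.2 then d.insert p.1 (cfnDigitVal p.2) else d)
    ((PySem.List.enumerate cfnWords).foldl (fun d p =>
      ((List.range cs.length).filter (fun k => PySem.Chars.startswith (cs.drop k) p.2)).foldl
        (fun d (o : Nat) => d.insert (o : Int) p.1) d) PySem.Dict.empty)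

theorem cfnPairNe (cs : List Char) (s : Int) :
    (PySem.List.enumerate cs s).Pairwise (fun a b => a.1 ≠ b.1) :=
  (PySem.List.pairwise_lt_enumerate cs s).imp (fun h => ne_of_lt h)

theorem nodup_keys_cfnDict (cs : List Char) : (cfnDict cs).keys.Nodup := by
  have h1 : ∀ (l : List (Int × List Char)) (d : PySem.Dict Int Int), d.keys.Nodup →
      (l.foldl (fun d p =>
        ((List.range cs.length).filter (fun k => PySem.Chars.startswith (cs.drop k) p.2)).foldl
          (fun d (o : Nat) => d.insert (o : Int) p.1) d) d).keys.Nodup := by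
    intro l
    induction l with
    | nil => intro d h; exact h
    | cons p l ih =>
      intro d h
      exact ih _ (PySem.Dict.nodup_keys_foldl_insert_key _ (Nat.cast : Nat → Int) (fun _ _ => p.1) _ h)
  have h2 : ∀ (l : List (Int × Char)) (d : PySem.Dict Int Int), d.keys.Nodup →
      (l.foldl (fun d p => if cfnIsNumber p.2 then d.insert p.1 (cfnDigitVal p.2) else d) d).keys.Nodup := by
    intro l
    induction l with
    | nil => intro d h; exact h
    | cons p l ih =>
      intro d h
      by_cases hn : cfnIsNumber p.2 = true
      · simpa [hn] using ih _ (PySem.Dict.nodup_keys_insert _ _ _ h)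
      · simp only [Bool.not_eq_true] at hn
        simpa [hn] using ih _ h
  exact h2 _ _ (h1 _ _ PySem.Dict.nodup_keys_empty)

theorem get?_cfnDict (cs : List Char) (k : Nat) (hk : k < cs.length) :
    (cfnDict cs).get? (k : Int) = cfnValAt (cs.drop k) := by
  unfold cfnDict
  rw [get?_digitFold _ _ _ (cfnPairNe cs 0), find?_enum_digit]
  have h0 : ((k : Int) - 0).toNat = k := by omega
  rw [if_pos (by omega), h0, List.getElem?_eq_getElem hk]
  rw [List.drop_eq_getElem_cons hk]
  by_cases hn : cfnIsNumber cs[k] = true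
  · simp only [hn, Option.bind_some]
    simp [cfnValAt, hn]
  · simp only [Bool.not_eq_true] at hn
    simp only [hn, Option.bind_some, Bool.false_eq_true, if_false]
    rw [get?_wordFold cs _ _ _ (cfnUnique cs (k : Int))]
    have hpred : (fun p : Int × List Char => cfnMatchB cs (k : Int) p.2)
        = fun p => PySem.Chars.startswith (cs.drop k) p.2 := by
      funext p; exact matchB_natCast cs k hk p.2
    rw [hpred]
    simp only [cfnValAt, hn, Bool.false_eq_true, if_false]
    rw [← List.drop_eq_getElem_cons hk]
    cases hf : (PySem.List.enumerate cfnWords).find? (fun p => PySem.Chars.startswith (cs.drop k) p.2) <;> simp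

theorem get?_cfnDict_none (cs : List Char) (j : Int)
    (h : ∀ k : Nat, k < cs.length → j ≠ (k : Int)) : (cfnDict cs).get? j = none := by
  unfold cfnDict
  rw [get?_digitFold _ _ _ (cfnPairNe cs 0), find?_enum_digit]
  have hdig : (if 0 ≤ j - 0 then
      (cs[(j - 0).toNat]?).bind (fun c => if cfnIsNumber c then some (j, c) else none)
      else none) = none := by
    by_cases hge : 0 ≤ j
    · have : cs.length ≤ (j - 0).toNat ∨ (j - 0).toNat < cs.length := by omega
      have hout : cs[(j - 0).toNat]? = none := by
        rcases this with h' | h'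
        · exact List.getElem?_eq_none h'
        · exact absurd (by omega : j = ((j - 0).toNat : Int)) (h _ h')
      rw [if_pos (by omega), hout, Option.bind_none]
    · rw [if_neg (by omega)]
  rw [hdig]
  rw [get?_wordFold cs _ _ _ (cfnUnique cs j)]
  have hpred : (PySem.List.enumerate cfnWords).find? (fun p => cfnMatchB cs j p.2) = none := by
    rw [List.find?_eq_none]
    intro p _
    simp [matchB_out cs j p.2 h]
  rw [hpred]
  simp

def cfnList (cs : List Char) : List (Int × Int) :=
  (List.range cs.length).filterMap (fun k => (cfnValAt (cs.drop k)).map (fun v => ((k : Int), v)))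

theorem cfnList_pairwise (cs : List Char) :
    (cfnList cs).Pairwise (fun a b => a.1 < b.1) := by
  apply List.Pairwise.filterMap _ _ List.pairwise_lt_range
  intro a a' hlt b hb b' hb'
  rcases Option.map_eq_some_iff.mp hb with ⟨v, _, rfl⟩
  rcases Option.map_eq_some_iff.mp hb' with ⟨v', _, rfl⟩
  show (a:Int) < (a':Int)
  exact_mod_cast hlt

theorem mem_cfnDict_items_iff (cs : List Char) (p : Int × Int) :
    p ∈ (cfnDict cs).items ↔ ∃ k : Nat, k < cs.length ∧ p.1 = (k : Int) ∧ cfnValAt (cs.drop k) = some p.2 := by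
  rw [← PySem.Dict.get?_eq_some_iff_mem_items _ _ _ (nodup_keys_cfnDict cs)]
  constructor
  · intro hg
    by_cases hex : ∃ k : Nat, k < cs.length ∧ p.1 = (k : Int)
    · obtain ⟨k, hk, he⟩ := hex
      refine ⟨k, hk, he, ?_⟩
      rw [← get?_cfnDict cs k hk, ← he, hg]
    · push Not at hex
      rw [get?_cfnDict_none cs p.1 hex] at hg
      exact absurd hg (by simp)
  · rintro ⟨k, hk, he, hv⟩
    rw [he, get?_cfnDict cs k hk, hv]

theorem mem_cfnList_iff (cs : List Char) (p : Int × Int) :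
    p ∈ cfnList cs ↔ ∃ k : Nat, k < cs.length ∧ p.1 = (k : Int) ∧ cfnValAt (cs.drop k) = some p.2 := by
  simp only [cfnList, List.mem_filterMap, List.mem_range, Option.map_eq_some_iff]
  constructor
  · rintro ⟨k, hk, v, hv, rfl⟩
    exact ⟨k, hk, rfl, hv⟩
  · rintro ⟨k, hk, he, hv⟩
    exact ⟨k, hk, p.2, hv, by rw [← he]⟩

theorem cfnList_perm (cs : List Char) : (cfnList cs).Perm (cfnDict cs).items := by
  rw [List.perm_ext_iff_of_nodup ?_ ?_]
  · intro p
    rw [mem_cfnList_iff, mem_cfnDict_items_iff]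
  · exact List.Pairwise.imp (fun h => ne_of_apply_ne Prod.fst (ne_of_lt h)) (cfnList_pairwise cs)
  · exact (nodup_keys_cfnDict cs).of_map _

theorem insertBy_congr' {α : Type} (bf bf' : α → α → Bool) (x : α) :
    ∀ (acc : List α), (∀ y ∈ acc, bf x y = bf' x y) →
      PySem.List.insertBy bf x acc = PySem.List.insertBy bf' x acc := by
  intro acc
  induction acc with
  | nil => intro _; rfl
  | cons y ys ih =>
    intro h
    show (if bf x y then x :: y :: ys else y :: PySem.List.insertBy bf x ys)
        = (if bf' x y then x :: y :: ys else y :: PySem.List.insertBy bf' x ys)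
    rw [h y List.mem_cons_self, ih (fun z hz => h z (List.mem_cons_of_mem _ hz))]

theorem foldl_insertBy_congr' {α : Type} (bf bf' : α → α → Bool) :
    ∀ (l acc : List α), (∀ a, (a ∈ acc ∨ a ∈ l) → ∀ b, (b ∈ acc ∨ b ∈ l) → bf a b = bf' a b) →
      l.foldl (fun a x => PySem.List.insertBy bf x a) acc = l.foldl (fun a x => PySem.List.insertBy bf' x a) acc := by
  intro l
  induction l with
  | nil => intro acc _; rfl
  | cons x l ih =>
    intro acc h
    rw [List.foldl_cons, List.foldl_cons,
        insertBy_congr' bf bf' x acc (fun y hy => h x (Or.inr List.mem_cons_self) y (Or.inl hy))]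
    apply ih
    intro a ha b hb
    have hmem : ∀ z, z ∈ PySem.List.insertBy bf' x acc ∨ z ∈ l → (z ∈ acc ∨ z ∈ x :: l) := by
      intro z hz
      rcases hz with hz | hz
      · rcases (PySem.List.mem_insertBy _ _ _ _).mp hz with hz' | hz'
        · exact Or.inr (hz' ▸ List.mem_cons_self)
        · exact Or.inl hz'
      · exact Or.inr (List.mem_cons_of_mem _ hz)
    exact h a (hmem a ha) b (hmem b hb)

theorem sorted2_eq_sorted_fst (xs : List (Int × Int))
    (hinj : ∀ p ∈ xs, ∀ q ∈ xs, p.1 = q.1 → p = q) :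
    PySem.List.sorted2 xs (·.1) (·.2) = PySem.List.sorted xs (·.1) := by
  show xs.foldl (fun acc x => PySem.List.insertBy _ x acc) []
      = xs.foldl (fun acc x => PySem.List.insertBy _ x acc) []
  apply foldl_insertBy_congr'
  intro a ha b hb
  rcases ha with ha | ha
  · exact absurd ha (List.not_mem_nil)
  rcases hb with hb | hb
  · exact absurd hb (List.not_mem_nil)
  by_cases he : a.1 = b.1
  · have : a = b := hinj a ha b hb he
    subst this
    simp
  · by_cases hlt : a.1 < b.1
    · simp [hlt]
    · have : b.1 < a.1 := by omega
      simp [hlt, this]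



theorem cfnItems_fst_inj (cs : List Char) :
    ∀ p ∈ (cfnDict cs).items, ∀ q ∈ (cfnDict cs).items, p.1 = q.1 → p = q := by
  intro p hp q hq he
  rw [mem_cfnDict_items_iff] at hp hq
  obtain ⟨k, hk, he1, hv1⟩ := hp
  obtain ⟨k', hk', he2, hv2⟩ := hq
  have hkk : k = k' := by
    have : (k : Int) = (k' : Int) := by rw [← he1, ← he2, he]
    exact_mod_cast this
  subst hkk
  have h2 : p.2 = q.2 := by
    have := hv1.symm.trans hv2
    exact Option.some_injective _ this
  exact Prod.ext (by rw [he1, he2]) h2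

theorem check_for_numbers_spec' (line : String) :
    check_for_numbers line = check_for_numbers_alt line := by
  have h0 : check_for_numbers line
      = (PySem.List.sorted2 (cfnDict line.toList).items (·.1) (·.2)).map (·.2) := rfl
  rw [h0, sorted2_eq_sorted_fst _ (cfnItems_fst_inj _),
      PySem.List.sorted_eq_of_perm_of_pairwise_lt _ _ _ (cfnList_perm _) (cfnList_pairwise _)]
  show (cfnList line.toList).map (·.2) = check_for_numbers_alt line
  rw [show check_for_numbers_alt line = cfnScan line.toList from rfl, cfnScan_eq_filterMap]
  unfold cfnList
  rw [List.map_filterMap]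
  congr 1
  funext k
  cases cfnValAt (line.toList.drop k) <;> simp

-- ===== VERDICT (by name: the statement is the Claim_ definition above) =====
theorem check_for_numbers_spec : Claim_equal_check_for_numbers := by
  intro line _
  unfold Spec_check_for_numbers
  exact check_for_numbers_spec' line
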